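-- pv_equiv track=rewrite | github.com/parallelno/Vector06c | Vector06c_Dev/_Projects/GameNoname/scripts/common.py | bytes_to_asm
-- ===== SOURCE A (Python) =====
-- def bytes_to_asm(data, numbers_in_line = 16):
-- 	asm = ""
-- 	for i, byte in enumerate(data):
-- 		if i % numbers_in_line == 0:
-- 			if i != 0:
-- 				asm += "\n"
-- 			asm += "			.byte "
-- 		asm += str(byte) + ","
-- 	return asm + "\n"
-- ===== SOURCE B (Python) =====
-- def bytes_to_asm(data, numbers_in_line = 16):
-- 	data = list(data)
-- 	lines = []
-- 	for i in range(0, len(data), numbers_in_line):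
-- 		chunk = data[i:i + numbers_in_line]
-- 		lines.append("\t\t\t.byte " + "".join(str(b) + "," for b in chunk))
-- 	return "\n".join(lines) + "\n"
-- ===== Notes on version B (the rewrite author's own statement) =====
-- stated objective: simpler
-- what changed: Replaces A's flat stateful loop with a modulo counter and newline bookkeeping by chunking: iterate over range(0, len(data), numbers_in_line), slice each chunk, render each line with join, and ' '.join the lines.
-- outside the precondition, e.g. on bytes_to_asm([1, 2], -1): A returns '\t\t\t.byte 1,\n\t\t\t.byte 2,\n', B returns '\n'; on bytes_to_asm([], 0): A returns '\n', B raises ValueError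
import Mathlib
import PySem

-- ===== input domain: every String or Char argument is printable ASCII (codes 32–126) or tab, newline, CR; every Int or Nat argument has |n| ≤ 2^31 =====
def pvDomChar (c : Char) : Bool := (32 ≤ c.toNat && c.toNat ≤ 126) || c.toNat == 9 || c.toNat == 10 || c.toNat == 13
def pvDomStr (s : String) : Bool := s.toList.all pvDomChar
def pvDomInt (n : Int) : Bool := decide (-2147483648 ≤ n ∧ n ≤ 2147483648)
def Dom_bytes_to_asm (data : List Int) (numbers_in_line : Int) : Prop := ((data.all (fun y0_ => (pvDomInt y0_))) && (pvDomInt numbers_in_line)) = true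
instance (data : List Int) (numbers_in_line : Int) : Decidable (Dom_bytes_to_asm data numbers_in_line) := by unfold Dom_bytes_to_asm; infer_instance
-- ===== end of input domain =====

-- B replaces A's modulo-counted single pass by chunked slicing (range/slice/join); equivalence is about the return value only.

-- ===== PORT A =====
def pvStepA (numbers_in_line : Int) (asm : String) (p : Int × Int) : String :=
  let asm := if PySem.Int.mod p.1 numbers_in_line = 0 then
      (if p.1 ≠ 0 then asm ++ "\n" else asm) ++ "\t\t\t.byte "
    else asm
  asm ++ PySem.Int.toStr p.2 ++ ","

def bytes_to_asm (data : List Int) (numbers_in_line : Int) : String :=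
  (PySem.List.enumerate data 0).foldl (pvStepA numbers_in_line) "" ++ "\n"

-- ===== PORT B =====
def pvLineB (data : List Int) (numbers_in_line : Int) (i : Int) : String :=
  "\t\t\t.byte " ++
    PySem.Str.join "" ((PySem.List.slice data (some i) (some (i + numbers_in_line))).map
      (fun b => PySem.Int.toStr b ++ ","))

def bytes_to_asm_alt (data : List Int) (numbers_in_line : Int) : String :=
  PySem.Str.join "\n"
      ((PySem.List.pyRange 0 (PySem.List.len data) numbers_in_line).map
        (pvLineB data numbers_in_line)) ++ "\n"

-- ===== PRECONDITION & SPEC =====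
-- Pre_ restricts to positive line widths, the function's natural domain: with numbers_in_line = 0 A raises
-- ZeroDivisionError on nonempty data (and B raises ValueError), and for negative widths A's grouping (same
-- as for |numbers_in_line|) is an accident of Python's modulo sign rule, where B naturally yields no chunks.
def Pre_bytes_to_asm (data : List Int) (numbers_in_line : Int) : Prop := 0 < numbers_in_line
instance (data : List Int) (numbers_in_line : Int) : Decidable (Pre_bytes_to_asm data numbers_in_line) := by unfold Pre_bytes_to_asm; infer_instance

def pvWitness_bytes_to_asm : List Int × Int := ([1, 2, 3], 2)

def Spec_bytes_to_asm (data : List Int) (numbers_in_line : Int) (out : String) : Prop := out = bytes_to_asm_alt data numbers_in_line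
instance (data : List Int) (numbers_in_line : Int) (out : String) : Decidable (Spec_bytes_to_asm data numbers_in_line out) := by unfold Spec_bytes_to_asm; infer_instance

-- ===== CLAIM (what is proved, stated in full; the proofs are below) =====
def Claim_equal_bytes_to_asm : Prop := ∀ (data : List Int) (numbers_in_line : Int), Dom_bytes_to_asm data numbers_in_line → Pre_bytes_to_asm data numbers_in_line → Spec_bytes_to_asm data numbers_in_line (bytes_to_asm data numbers_in_line)

-- ===== LEMMAS AND PROOFS =====

-- the per-byte text "str(b)+','" for a whole chunk, concatenated
def pvBstr : List Int → String
  | [] => ""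
  | b :: t => (PySem.Int.toStr b ++ ",") ++ pvBstr t

-- common shape of the output (one chunk of size km+1 per line), shared target of both ports
def pvS (km : Nat) : List Int → String
  | [] => ""
  | a :: t =>
    "\t\t\t.byte " ++ (PySem.Int.toStr a ++ ",") ++ pvBstr (t.take km) ++
      (if t.drop km = [] then "" else "\n" ++ pvS km (t.drop km))
termination_by l => l.length
decreasing_by simp only [List.length_drop, List.length_cons]; omega

-- Str.join unrolling at the String level
theorem pvJoin_nil (sep : String) : PySem.Str.join sep [] = "" := by
  refine String.toList_inj.mp ?_
  simp [PySem.Str.toList_join, PySem.Chars.join_nil]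

theorem pvJoin_singleton (sep p : String) : PySem.Str.join sep [p] = p := by
  refine String.toList_inj.mp ?_
  simp [PySem.Str.toList_join, PySem.Chars.join_singleton]

theorem pvJoin_cons_cons (sep p q : String) (r : List String) :
    PySem.Str.join sep (p :: q :: r) = p ++ sep ++ PySem.Str.join sep (q :: r) := by
  refine String.toList_inj.mp ?_
  simp [PySem.Str.toList_join, PySem.Chars.join_cons_cons]

theorem pvJoin_empty_bstr (l : List Int) :
    PySem.Str.join "" (l.map (fun b => PySem.Int.toStr b ++ ",")) = pvBstr l := by
  induction l with
  | nil => simp [pvJoin_nil, pvBstr]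
  | cons a t ih =>
    cases t with
    | nil => simp [pvJoin_singleton, pvBstr]
    | cons b r =>
      simp only [List.map_cons] at ih ⊢
      rw [pvJoin_cons_cons]
      simp only [pvBstr] at ih ⊢
      rw [ih]
      simp [String.append_assoc]

theorem pvFoldA_flat (n : Int) : ∀ (l : List Int) (s : Int) (asm : String),
    (∀ j : Int, s ≤ j → j < s + l.length → PySem.Int.mod j n ≠ 0) →
    (PySem.List.enumerate l s).foldl (pvStepA n) asm = asm ++ pvBstr l := by
  intro l
  induction l with
  | nil => intro s asm _; simp [PySem.List.enumerate_nil, pvBstr]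
  | cons a t ih =>
    intro s asm h
    rw [PySem.List.enumerate_cons]
    simp only [List.foldl_cons]
    have hs : PySem.Int.mod s n ≠ 0 := by
      apply h s le_rfl
      simp only [List.length_cons]
      push_cast
      omega
    have hstep : pvStepA n asm (s, a) = asm ++ (PySem.Int.toStr a ++ ",") := by
      simp [pvStepA, hs, String.append_assoc]
    rw [hstep, ih (s + 1) _ ?_]
    · simp [pvBstr, String.append_assoc]
    · intro j hj1 hj2
      apply h j (by omega)
      simp only [List.length_cons]
      push_cast
      push_cast at hj2
      omega

theorem pvFoldA_main (n : Int) (hn : 0 < n) : ∀ (N : Nat) (l : List Int), l.length ≤ N → l ≠ [] →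
    ∀ (s : Int) (asm : String), 0 ≤ s → n ∣ s →
    (PySem.List.enumerate l s).foldl (pvStepA n) asm
      = asm ++ (if s = 0 then "" else "\n") ++ pvS (n.toNat - 1) l := by
  intro N
  induction N with
  | zero =>
    intro l hlen hne
    cases l with
    | nil => exact absurd rfl hne
    | cons a t => simp at hlen
  | succ N ih =>
    intro l hlen hne s asm hs0 hdvd
    obtain ⟨a, t, rfl⟩ : ∃ a t, l = a :: t := by
      cases l with
      | nil => exact absurd rfl hne
      | cons a t => exact ⟨a, t, rfl⟩
    have hnn : ((n.toNat : Int)) = n := Int.toNat_of_nonneg (le_of_lt hn)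
    set m : Nat := n.toNat with hm
    have hm1 : 1 ≤ m := by omega
    set km : Nat := m - 1 with hkm
    rw [PySem.List.enumerate_cons]
    simp only [List.foldl_cons]
    have hsmod : PySem.Int.mod s n = 0 := (PySem.Int.mod_eq_zero_iff_dvd s n).mpr hdvd
    have hstep : pvStepA n asm (s, a)
        = asm ++ (if s = 0 then "" else "\n") ++ "\t\t\t.byte " ++ (PySem.Int.toStr a ++ ",") := by
      by_cases h0 : s = 0
      · subst h0; simp [pvStepA, hsmod, String.append_assoc, String.append_empty]
      · simp [pvStepA, hsmod, h0, String.append_assoc]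
    rw [hstep]
    -- split the tail into the rest of this chunk and the remaining chunks
    have henum : PySem.List.enumerate t (s + 1)
        = PySem.List.enumerate (t.take km) (s + 1) ++
          PySem.List.enumerate (t.drop km) (s + 1 + ((t.take km).length : Int)) := by
      conv_lhs => rw [(List.take_append_drop km t).symm]
      rw [PySem.List.enumerate_append]
    rw [henum, List.foldl_append]
    have hflat : ∀ asm', (PySem.List.enumerate (t.take km) (s + 1)).foldl (pvStepA n) asm'
        = asm' ++ pvBstr (t.take km) := by
      intro asm'
      apply pvFoldA_flat
      intro j hj1 hj2
      have hlenle : (t.take km).length ≤ km := by simp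
      intro hmod
      have hdj : n ∣ j := (PySem.Int.mod_eq_zero_iff_dvd j n).mp hmod
      have hdiff : n ∣ (j - s) := Int.dvd_sub hdj hdvd
      have hpos : 0 < j - s := by omega
      have := Int.le_of_dvd hpos hdiff
      have hjlt : j < s + 1 + km := by
        have : ((t.take km).length : Int) ≤ (km : Int) := by exact_mod_cast hlenle
        omega
      omega
    rw [hflat]
    by_cases hdrop : t.drop km = []
    · have htk : t.take km = t := by
        have h := List.take_append_drop km t
        rw [hdrop] at h
        simpa using h
      rw [hdrop, PySem.List.enumerate_nil]
      simp only [List.foldl_nil]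
      conv_rhs => rw [pvS]
      rw [hdrop, htk]
      simp [String.append_assoc, String.append_empty]
    · have hklen : km ≤ t.length := by
        by_contra hlt
        exact hdrop (List.drop_eq_nil_of_le (by omega))
      have htklen : (t.take km).length = km := by simp [hklen]
      have hs2 : s + 1 + ((t.take km).length : Int) = s + n := by
        rw [htklen]; omega
      rw [hs2]
      rw [ih (t.drop km) (by simp only [List.length_cons] at hlen; simp; omega) hdrop
          (s + n) _ (by omega) (Dvd.dvd.add hdvd (dvd_refl n))]
      have hsn : ¬ (s + n = 0) := by omega
      conv_rhs => rw [pvS]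
      simp only [hdrop, hsn, if_false, String.append_assoc]

theorem pvA_eq_S (data : List Int) (n : Int) (hn : 0 < n) :
    bytes_to_asm data n = pvS (n.toNat - 1) data ++ "\n" := by
  cases data with
  | nil =>
    simp only [bytes_to_asm, PySem.List.enumerate_nil, List.foldl_nil, pvS]
  | cons a t =>
    unfold bytes_to_asm
    rw [pvFoldA_main n hn (a :: t).length (a :: t) le_rfl (List.cons_ne_nil a t) 0 "" le_rfl
      (dvd_zero n)]
    simp [String.empty_append]

-- B side: one chunk-shift step for the line builder
theorem pvLineB_shift (data : List Int) (n : Int) (hn : 0 < n) (k : Nat) :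
    pvLineB data n (0 + n * (((k + 1 : Nat)) : Int))
      = pvLineB (data.drop n.toNat) n (0 + n * ((k : Nat) : Int)) := by
  have hnn : ((n.toNat : Int)) = n := Int.toNat_of_nonneg (le_of_lt hn)
  set m : Nat := n.toNat with hm
  unfold pvLineB
  congr 2
  have h2 : (0 : Int) + n * (((k + 1 : Nat)) : Int) + n = ((m * (k + 1) : Nat) : Int) + ((m : Nat) : Int) := by
    push_cast
    rw [hnn]
    ring
  have h1 : (0 : Int) + n * (((k + 1 : Nat)) : Int) = ((m * (k + 1) : Nat) : Int) := by
    push_cast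
    rw [hnn]
    ring
  have h4 : (0 : Int) + n * ((k : Nat) : Int) + n = ((m * k : Nat) : Int) + ((m : Nat) : Int) := by
    push_cast
    rw [hnn]
    ring
  have h3 : (0 : Int) + n * ((k : Nat) : Int) = ((m * k : Nat) : Int) := by
    push_cast
    rw [hnn]
    ring
  rw [h2, h1, h4, h3]
  rw [PySem.List.slice_natCast_add, PySem.List.slice_natCast_add]
  rw [List.drop_drop]
  congr 1
  ring_nf

-- pyRange 0 len n for 0 < n, 0 < len, unrolled to a range over chunk counts
theorem pvCnt_eq (len : Int) (n : Int) (hn : 0 < n) (hlen : 0 < len) :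
    (if (0 : Int) < len then ((len - 0 + n - 1) / n).toNat else 0)
      = ((len - 1) / n).toNat + 1 := by
  rw [if_pos hlen]
  have h : (len - 0 + n - 1) / n = (len - 1) / n + 1 := by
    have h1 := Int.add_mul_ediv_right (len - 1) 1 (by omega : n ≠ 0)
    rw [show len - 0 + n - 1 = len - 1 + 1 * n by ring, h1]
  have hnn : 0 ≤ (len - 1) / n := Int.ediv_nonneg (by omega) (by omega)
  omega

theorem pvB_join_eq_S (n : Int) (hn : 0 < n) : ∀ (N : Nat) (data : List Int), data.length ≤ N →
    data ≠ [] →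
    PySem.Str.join "\n"
        ((PySem.List.pyRange 0 (data.length : Int) n).map (pvLineB data n))
      = pvS (n.toNat - 1) data := by
  intro N
  induction N with
  | zero =>
    intro data hlen hne
    cases data with
    | nil => exact absurd rfl hne
    | cons a t => simp at hlen
  | succ N ih =>
    intro data hlen hne
    obtain ⟨a, t, rfl⟩ : ∃ a t, data = a :: t := by
      cases data with
      | nil => exact absurd rfl hne
      | cons a t => exact ⟨a, t, rfl⟩
    have hnn : ((n.toNat : Int)) = n := Int.toNat_of_nonneg (le_of_lt hn)
    set m : Nat := n.toNat with hm
    have hm1 : 1 ≤ m := by omega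
    have hlenpos : (0 : Int) < ((a :: t).length : Int) := by
      simp only [List.length_cons]; push_cast; omega
    rw [PySem.List.pyRange_of_pos _ _ hn, pvCnt_eq _ n hn hlenpos]
    set c : Nat := ((((a :: t).length : Int) - 1) / n).toNat with hc
    rw [List.range_succ_eq_map]
    simp only [List.map_cons, List.map_map, Function.comp_def, Nat.succ_eq_add_one]
    have hdd : (a :: t).drop m = t.drop (m - 1) := by
      obtain ⟨mm, hmm⟩ : ∃ mm, m = mm + 1 := ⟨m - 1, by omega⟩
      rw [show m - 1 = mm by omega, hmm, List.drop_succ_cons]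
    -- head line: the first chunk
    have hhead : pvLineB (a :: t) n (0 + n * ((0 : Nat) : Int))
        = "\t\t\t.byte " ++ (PySem.Int.toStr a ++ ",") ++ pvBstr (t.take (m - 1)) := by
      unfold pvLineB
      have h1 : (0 : Int) + n * ((0 : Nat) : Int) + n = ((0 : Nat) : Int) + ((m : Nat) : Int) := by
        simp [hnn]
      have h0 : (0 : Int) + n * ((0 : Nat) : Int) = ((0 : Nat) : Int) := by simp
      rw [h1, h0, PySem.List.slice_natCast_add, List.drop_zero]
      have htake : (a :: t).take m = a :: t.take (m - 1) := by
        obtain ⟨mm, hmm⟩ : ∃ mm, m = mm + 1 := ⟨m - 1, by omega⟩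
        rw [show m - 1 = mm by omega, hmm, List.take_succ_cons]
      rw [htake, pvJoin_empty_bstr]
      simp only [pvBstr]
      simp [String.append_assoc]
    -- shift every later line to the dropped list
    have htail : (List.range c).map (fun x => pvLineB (a :: t) n (0 + n * (((x + 1 : Nat)) : Int)))
        = (List.range c).map (fun x => pvLineB ((a :: t).drop m) n (0 + n * ((x : Nat) : Int))) := by
      refine List.map_congr_left ?_
      intro x _
      exact pvLineB_shift (a :: t) n hn x
    by_cases hdl : (a :: t).drop m = []
    · have hlenle : (a :: t).length ≤ m := by
        have := List.drop_eq_nil_iff.mp hdl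
        omega
      have hc0 : c = 0 := by
        have hdiv : (((a :: t).length : Int) - 1) / n = 0 := by
          apply Int.ediv_eq_zero_of_lt (by omega)
          have : ((a :: t).length : Int) ≤ (m : Int) := by exact_mod_cast hlenle
          omega
        rw [hc, hdiv]
        rfl
      rw [hc0]
      simp only [List.range_zero, List.map_nil]
      rw [pvJoin_singleton, hhead]
      conv_rhs => rw [pvS]
      rw [hdd] at hdl
      simp [hdl, String.append_assoc, String.append_empty]
    · have hmlen : m < (a :: t).length := by
        by_contra h
        exact hdl (List.drop_eq_nil_of_le (by omega))
      have hdlen : (((a :: t).drop m).length : Int) = ((a :: t).length : Int) - (m : Int) := by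
        rw [List.length_drop]; omega
      have hdpos : (0 : Int) < (((a :: t).drop m).length : Int) := by
        rw [hdlen]; omega
      have hc1 : 1 ≤ c := by
        have h1n : (1 : Int) ≤ (((a :: t).length : Int) - 1) / n := by
          rw [Int.le_ediv_iff_mul_le hn]
          have : (m : Int) < ((a :: t).length : Int) := by exact_mod_cast hmlen
          omega
        omega
      have hceq : (((((a :: t).drop m).length : Int) - 1) / n).toNat + 1 = c := by
        have hdiv : ((((a :: t).length : Int)) - 1) / n
            = (((a :: t).length : Int) - 1 - n) / n + 1 := by
          have h1 := Int.add_mul_ediv_right (((a :: t).length : Int) - 1 - n) 1 (by omega : n ≠ 0)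
          conv_lhs => rw [show ((a :: t).length : Int) - 1
              = ((a :: t).length : Int) - 1 - n + 1 * n by ring]
          rw [h1]
        have hnn2 : 0 ≤ (((a :: t).length : Int) - 1 - n) / n := by
          apply Int.ediv_nonneg ?_ (by omega)
          have : (m : Int) < ((a :: t).length : Int) := by exact_mod_cast hmlen
          omega
        have harg : (((a :: t).drop m).length : Int) - 1 = ((a :: t).length : Int) - 1 - n := by
          rw [hdlen, hnn]; ring
        rw [harg]
        omega
      have hback : (List.range c).map (fun x => pvLineB ((a :: t).drop m) n (0 + n * ((x : Nat) : Int)))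
          = (PySem.List.pyRange 0 ((((a :: t).drop m).length : Int)) n).map
              (pvLineB ((a :: t).drop m) n) := by
        rw [PySem.List.pyRange_of_pos _ _ hn, pvCnt_eq _ n hn hdpos, hceq]
        simp only [List.map_map, Function.comp_def]
      rw [htail, hback]
      set Ldrop := (PySem.List.pyRange 0 ((((a :: t).drop m).length : Int)) n).map
          (pvLineB ((a :: t).drop m) n) with hL
      have hneL : Ldrop ≠ [] := by
        intro h
        rw [← hback] at h
        have hlen0 := congrArg List.length h
        simp at hlen0
        omega
      obtain ⟨q, rest, hq⟩ := List.exists_cons_of_ne_nil hneL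
      rw [hq, pvJoin_cons_cons, ← hq]
      have hlenN : ((a :: t).drop m).length ≤ N := by
        simp only [List.length_drop, List.length_cons] at *
        omega
      rw [hL, ih ((a :: t).drop m) hlenN hdl, hhead]
      conv_rhs => rw [pvS]
      rw [← hdd] at *
      rw [if_neg hdl, hdd]
      simp [String.append_assoc]

theorem pvB_eq_S (data : List Int) (n : Int) (hn : 0 < n) :
    bytes_to_asm_alt data n = pvS (n.toNat - 1) data ++ "\n" := by
  cases data with
  | nil =>
    unfold bytes_to_asm_alt
    rw [show PySem.List.pyRange 0 (PySem.List.len ([] : List Int)) n = [] by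
      simp [PySem.List.pyRange_of_pos _ _ hn]]
    simp only [List.map_nil, pvS]
    rw [pvJoin_nil, String.empty_append]
  | cons a t =>
    unfold bytes_to_asm_alt
    simp only [PySem.List.len_eq]
    rw [pvB_join_eq_S n hn (a :: t).length (a :: t) le_rfl (List.cons_ne_nil a t)]

-- ===== VERDICT (by name: the statement is the Claim_ definition above) =====
theorem bytes_to_asm_spec : Claim_equal_bytes_to_asm := by
  intro data n _ hpre
  unfold Spec_bytes_to_asm
  rw [pvA_eq_S data n hpre, pvB_eq_S data n hpre]
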